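-- pv_equiv track=rewrite | github.com/codesubhash234/calculator | calculator.py | lenrig
-- ===== SOURCE A (Python) =====
-- def lenrig(t):
--     leni = 0
--     for i in t:
--         if i not in ['*','/','-','+']:
--             leni+=1
--         else:
--             return leni
--     return leni
-- ===== SOURCE B (Python) =====
-- def lenrig(t):
--     positions = [p for op in ('+', '-', '*', '/') if (p := t.find(op)) != -1]
--     return min(positions) if positions else len(t)
-- ===== Notes on version B (the rewrite author's own statement) =====
-- stated objective: idiomatic
-- what changed: Replaces the char-by-char counting loop by computing each operator's first position with str.find and taking the minimum (or len(t) if no operator occurs).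
import Mathlib
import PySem

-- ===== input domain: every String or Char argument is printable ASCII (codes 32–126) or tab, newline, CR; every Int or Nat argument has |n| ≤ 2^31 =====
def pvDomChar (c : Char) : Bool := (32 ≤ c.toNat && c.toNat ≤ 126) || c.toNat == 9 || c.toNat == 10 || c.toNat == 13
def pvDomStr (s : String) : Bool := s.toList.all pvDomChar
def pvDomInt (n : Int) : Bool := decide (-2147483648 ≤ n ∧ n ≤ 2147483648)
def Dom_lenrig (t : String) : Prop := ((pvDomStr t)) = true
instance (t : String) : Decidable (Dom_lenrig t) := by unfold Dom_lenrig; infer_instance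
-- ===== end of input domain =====

-- B replaces A's char-by-char counting loop with str.find per operator + minimum; return value only, no side effects.

-- ===== PORT A =====
-- the for-loop with its counter and early return on an operator character
def lenrigLoop : List Char → Int → Int
  | [], leni => leni
  | i :: rest, leni =>
    if i ∉ ['*', '/', '-', '+'] then lenrigLoop rest (leni + 1) else leni

def lenrig (t : String) : Int := lenrigLoop t.toList 0

-- ===== PORT B =====
def lenrig_alt (t : String) : Int :=
  let positions :=
    ((["+", "-", "*", "/"].map (fun op => PySem.Str.find t op)).filter
      (fun p => p != -1))
  match PySem.List.min? positions (fun x => x) with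
  | some m => m
  | none => PySem.Str.len t

-- ===== PRECONDITION & SPEC =====
def Spec_lenrig (t : String) (out : Int) : Prop := out = lenrig_alt t
instance (t : String) (out : Int) : Decidable (Spec_lenrig t out) := by unfold Spec_lenrig; infer_instance

-- ===== CLAIM (what is proved, stated in full; the proofs are below) =====
def Claim_equal_lenrig : Prop := ∀ (t : String), Dom_lenrig t → Spec_lenrig t (lenrig t)

-- ===== LEMMAS AND PROOFS =====

-- number of leading non-operator characters
def pvCnt (cs : List Char) : Nat :=
  (cs.takeWhile (fun c => !(['*', '/', '-', '+'].contains c))).length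

-- B on the char-list level (let-free restatement for rewriting)
def pvBval (cs : List Char) : Int :=
  match PySem.List.min?
      ((['+', '-', '*', '/'].map (fun op => PySem.Chars.find cs [op])).filter
        (fun p => p != -1)) (fun x => x) with
  | some m => m
  | none => (cs.length : Int)

theorem pvLoop_eq_cnt (cs : List Char) (leni : Int) :
    lenrigLoop cs leni = leni + pvCnt cs := by
  induction cs generalizing leni with
  | nil => simp [lenrigLoop, pvCnt]
  | cons c rest ih =>
    by_cases h : c ∈ ['*', '/', '-', '+'] <;>
      simp [lenrigLoop, pvCnt, List.takeWhile, h, ih] <;> omega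

theorem pvGo_shift (sub cs : List Char) (k : Nat) :
    PySem.Chars.find.go sub cs (k + 1) =
      if PySem.Chars.find.go sub cs k = -1 then -1
      else PySem.Chars.find.go sub cs k + 1 := by
  induction cs generalizing k with
  | nil =>
    by_cases h : sub.isEmpty <;> simp [PySem.Chars.find.go, h]
  | cons c rest ih =>
    by_cases h : sub.isPrefixOf (c :: rest) <;> simp [PySem.Chars.find.go, h, ih]

theorem pvGo_cases (sub cs : List Char) (k : Nat) :
    PySem.Chars.find.go sub cs k = -1 ∨ (k : Int) ≤ PySem.Chars.find.go sub cs k := by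
  induction cs generalizing k with
  | nil =>
    by_cases h : sub.isEmpty <;> simp [PySem.Chars.find.go, h]
  | cons c rest ih =>
    by_cases h : sub.isPrefixOf (c :: rest) <;> simp [PySem.Chars.find.go, h]
    rcases ih (k + 1) with h1 | h1
    · left; exact h1
    · right; omega

theorem pvFind_nonneg (cs sub : List Char) :
    PySem.Chars.find cs sub = -1 ∨ 0 ≤ PySem.Chars.find cs sub := by
  simpa using pvGo_cases sub cs 0

theorem pvFind_cons (c : Char) (cs : List Char) (op : Char) :
    PySem.Chars.find (c :: cs) [op] =
      if c = op then 0
      else if PySem.Chars.find cs [op] = -1 then -1 else PySem.Chars.find cs [op] + 1 := by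
  show PySem.Chars.find.go [op] (c :: cs) 0 = _
  rw [show PySem.Chars.find.go [op] (c :: cs) 0 =
        if [op].isPrefixOf (c :: cs) then (0 : Int) else PySem.Chars.find.go [op] cs 1
      from rfl]
  by_cases h : c = op
  · simp [h, List.isPrefixOf]
  · rw [if_neg (by simp [List.isPrefixOf, Ne.symm h]), if_neg h]
    exact pvGo_shift [op] cs 0

-- filtering the shifted finds = shifting the filtered finds (all entries are find results, hence ≥ -1)
theorem pvFilter_shift (ys : List Int) (hys : ∀ x ∈ ys, -1 ≤ x) :
    ((ys.map (fun x => if x = -1 then (-1 : Int) else x + 1)).filter (fun p => p != -1)) =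
      (ys.filter (fun p => p != -1)).map (fun x => x + 1) := by
  induction ys with
  | nil => rfl
  | cons y t ih =>
    have hy := hys y (by simp)
    have ht : ∀ x ∈ t, -1 ≤ x := fun x hx => hys x (by simp [hx])
    by_cases h : y = -1
    · simp [h, List.filter_cons, ih ht]
    · have h1 : ((y + 1) != -1) = true := by simp; omega
      have h2 : (y != -1) = true := by simp [h]
      simp [List.filter_cons, h, h1, h2, ih ht]

theorem pvFoldl_min_add (t : List Int) (x : Int) :
    (t.map (fun v => v + 1)).foldl min (x + 1) = t.foldl min x + 1 := by
  induction t generalizing x with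
  | nil => rfl
  | cons y ys ih =>
    simp only [List.map, List.foldl]
    rw [show min (x + 1) (y + 1) = min x y + 1 by omega]
    exact ih (min x y)

theorem pvAlt_eq_bval (t : String) : lenrig_alt t = pvBval t.toList := by
  simp [lenrig_alt, pvBval, PySem.Str.find, PySem.Str.len,
    show "+".toList = ['+'] from by decide, show "-".toList = ['-'] from by decide,
    show "*".toList = ['*'] from by decide, show "/".toList = ['/'] from by decide]

theorem pvBval_eq_cnt (cs : List Char) : pvBval cs = (pvCnt cs : Int) := by
  induction cs with
  | nil => decide
  | cons c rest ih =>
    by_cases hc : c ∈ ['+', '-', '*', '/']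
    · -- first char is an operator: some find is 0, all positions are ≥ 0, so the min is 0
      have hfind : PySem.Chars.find (c :: rest) [c] = 0 := by
        rw [pvFind_cons]; simp
      have hmem : (0 : Int) ∈
          ((['+', '-', '*', '/'].map (fun op => PySem.Chars.find (c :: rest) [op])).filter
            (fun p => p != -1)) := by
        refine List.mem_filter.2 ⟨List.mem_map.2 ⟨c, hc, hfind⟩, by decide⟩
      have hcnt : pvCnt (c :: rest) = 0 := by
        fin_cases hc <;> simp [pvCnt, List.takeWhile_cons]
      unfold pvBval
      rcases hmin : PySem.List.min? (((['+', '-', '*', '/'].map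
          (fun op => PySem.Chars.find (c :: rest) [op])).filter (fun p => p != -1)))
          (fun x => x) with _ | m
      · exact absurd ((PySem.List.min?_eq_none_iff _ _).1 hmin ▸ hmem) (by simp)
      · have h1 : m ≤ 0 := PySem.List.min?_isMin hmin 0 hmem
        have h2 : 0 ≤ m := by
          have hm := PySem.List.min?_mem hmin
          rcases List.mem_filter.1 hm with ⟨hm1, hm2⟩
          rcases List.mem_map.1 hm1 with ⟨op, _, hop⟩
          rcases pvFind_nonneg (c :: rest) [op] with h | h
          · rw [← hop] at hm2; simp [h] at hm2
          · omega
        rw [hcnt]; simp; omega  -- simp reduces the match on `some m`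
    · -- first char is not an operator: every find shifts by one, so the min shifts by one
      have hshift : (['+', '-', '*', '/'].map (fun op => PySem.Chars.find (c :: rest) [op])) =
          (['+', '-', '*', '/'].map (fun op => PySem.Chars.find rest [op])).map
            (fun x => if x = -1 then (-1 : Int) else x + 1) := by
        simp only [List.map_map]
        refine List.map_congr_left (fun op hop => ?_)
        have hne : c ≠ op := fun h => hc (h ▸ hop)
        simp [Function.comp, pvFind_cons, hne]
      have hys : ∀ x ∈ (['+', '-', '*', '/'].map (fun op => PySem.Chars.find rest [op])),
          (-1 : Int) ≤ x := by
        intro x hx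
        rcases List.mem_map.1 hx with ⟨op, _, hop⟩
        rcases pvFind_nonneg rest [op] with h | h <;> omega
      have hcnt : pvCnt (c :: rest) = pvCnt rest + 1 := by
        simp only [List.mem_cons, List.not_mem_nil, or_false] at hc
        push_neg at hc
        simp [pvCnt, List.takeWhile_cons, hc.1, hc.2.1, hc.2.2.1, hc.2.2.2]
      unfold pvBval at ih ⊢
      rw [hshift, pvFilter_shift _ hys]
      rcases hps : ((['+', '-', '*', '/'].map (fun op => PySem.Chars.find rest [op])).filter
          (fun p => p != -1)) with _ | ⟨x, tl⟩
      · -- no operator occurs anywhere: both sides give the length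
        rw [hps] at ih
        have hn : PySem.List.min? ([] : List Int) (fun x => x) = none :=
          (PySem.List.min?_eq_none_iff _ _).2 rfl
        rw [hn] at ih
        simp only [List.map_nil, hn]
        simp at ih ⊢
        omega
      · rw [hps] at ih
        rw [PySem.List.min?_id_cons] at ih
        rw [List.map_cons, PySem.List.min?_id_cons, pvFoldl_min_add]
        rw [hcnt]
        simp at ih ⊢
        omega

-- ===== VERDICT (by name: the statement is the Claim_ definition above) =====
theorem lenrig_spec : Claim_equal_lenrig := by
  intro t _
  show lenrig t = lenrig_alt t
  rw [lenrig, pvLoop_eq_cnt, pvAlt_eq_bval, pvBval_eq_cnt]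
  omega
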